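-- pv_equiv track=rewrite | github.com/azmathussain76/KnightCoder | Codility/src/python/MappingCitiesAndRoads/main.py | solution
-- ===== SOURCE A (Python) =====
-- def solution(T):
--     # First create an adjacency count list K
--     K = {}
--
--     # And a list representing number of hops to get to each city
--     # R[i] = j -- City i takes j hops from capital
--     R = [0]*len(T)
--
--     # Finally, we will use a list as the return value representing
--     # a frequency map of city distances from the capital.
--     # This list will be size M-1 because this graph of M vertices
--     # has only M-1 edges (each node connected only once).
--     # Note, I'm deliberately leaving D as size M so I can take
--     # advantage of the alignment of distances to the indexes in the
--     # list.  At the end of the method, I'll trim the head of D to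
--     # make it M-1.
--     D = [0]*len(T)
--
--     # First find the capital
--     cap_index = -1
--     for i in range(0,len(T)):
--         if i == T[i]:
--             cap_index = i
--             break
--     if cap_index == -1:
--         return None
--
--     # Now reverse T so we can backwards iterate from the capital
--     # to the other cities.
--     for i,v in enumerate(T):
--         if i == cap_index:
--             continue
--         if v not in K:
--             K[v] = [i]
--         else:
--             K[v].append(i)
--
--     # Next recursively traverse from capital to each city, counting
--     # along the way the route and storing it into the Route list, R
--     RecursiveTraceMap(K, cap_index, R, 0)
--
--     # Now we need to get the answer in the format requested by the
--     # question.  From here transform the data in R to essentially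
--     # create a histogram of city distances from the capital.
--     for i in R:
--         D[i] += 1
--
--     # Trim D to equal M-1 edges
--     D = D[1:]
--
--     return D
--
-- def RecursiveTraceMap(K, index, Routes, R_count):
--
--     # Recursion Base case
--     # We have reached a terminal node and can store the length
--     if index in K:
--         dest_list = K[index]
--         R_count += 1
--         for i in dest_list:
--             Routes[i] = R_count
--             RecursiveTraceMap(K, i, Routes, R_count)
--     return
-- ===== SOURCE B (Python) =====
-- def solution(T):
--     n = len(T)
--     cap = next((i for i in range(n) if T[i] == i), None)
--     if cap is None:
--         return None
--     res = [0] * (n - 1)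
--     for i in range(n):
--         if i == cap:
--             continue
--         d = _depth(T, cap, i)
--         if d is not None:
--             res[d - 1] += 1
--     return res
--
-- def _depth(T, cap, i):
--     # walk parent pointers from i; depth = number of hops to the capital,
--     # None if the chain leaves the index range or cycles without reaching it
--     cur = i
--     for k in range(len(T)):
--         if cur == cap:
--             return k
--         if not (0 <= cur < len(T)):
--             return None
--         cur = T[cur]
--     return None
-- ===== Notes on version B (the rewrite author's own statement) =====
-- stated objective: simpler
-- what changed: Replaces A's child-adjacency dict, capital-rooted recursive DFS into a routes array and post-hoc histogram pass with a direct bounded parent-pointer walk from each city whose depth is tallied straight into the histogram.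
-- outside the precondition, e.g. on solution([5, 3]): A returns None, B returns None
import Mathlib
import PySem

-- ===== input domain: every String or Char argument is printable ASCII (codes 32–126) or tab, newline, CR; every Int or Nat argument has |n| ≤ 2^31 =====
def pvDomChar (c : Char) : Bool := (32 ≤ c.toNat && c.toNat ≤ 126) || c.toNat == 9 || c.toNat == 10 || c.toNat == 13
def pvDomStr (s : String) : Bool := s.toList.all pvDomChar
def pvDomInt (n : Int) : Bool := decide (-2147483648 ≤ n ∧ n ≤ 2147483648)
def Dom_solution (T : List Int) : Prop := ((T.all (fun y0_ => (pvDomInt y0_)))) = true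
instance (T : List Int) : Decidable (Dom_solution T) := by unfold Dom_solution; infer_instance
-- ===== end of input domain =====

-- B replaces the adjacency-dict + capital-rooted DFS of A by a bounded parent-pointer
-- walk from each city, tallied straight into the histogram (simpler; not faster).

-- ===== PORT A =====
-- RecursiveTraceMap; Python's recursion has no fuel, but its depth is at most the number
-- of nested child edges (< len(T)+1 on every input), so fuel len(T)+1 never runs out.
def pvRTM (K : PySem.Dict Int (List Int)) (fuel : Nat) (index : Int)
    (routes : List Int) (rcount : Int) : List Int :=
  match fuel with
  | 0 => routes
  | f + 1 =>
    match K.get? index with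
    | none => routes
    | some destList =>
      destList.foldl (fun r i => pvRTM K f i (PySem.List.pySetD r i (rcount + 1)) (rcount + 1)) routes

def solution (T : List Int) : List Int :=
  let n : Nat := T.length
  let r0 : List Int := List.replicate n (0 : Int)
  let d0 : List Int := List.replicate n (0 : Int)
  let cap : Int := (PySem.List.pyRange 0 (n : Int) 1).foldl
      (fun acc i => if acc = -1 ∧ i = PySem.List.pyGetD T i 0 then i else acc) (-1)
  if cap = -1 then []   -- Python returns None here (not an int list); Pre_solution excludes these inputs
  else
    let K := (PySem.List.enumerate T 0).foldl
      (fun K p => if p.1 = cap then K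
        else if K.contains p.2 = false then K.insert p.2 [p.1]
        else K.modify p.2 [] (fun l => l ++ [p.1])) PySem.Dict.empty
    let R := pvRTM K (n + 1) cap r0 0
    let D := R.foldl (fun D i => PySem.List.pySetD D i (PySem.List.pyGetD D i 0 + 1)) d0
    PySem.List.slice D (some 1) none

-- ===== PORT B =====
-- _depth: walk parent pointers for at most len(T) steps
def pvWalk (T : List Int) (cap : Int) (fuel : Nat) (cur : Int) (k : Int) : Option Int :=
  match fuel with
  | 0 => none
  | f + 1 =>
    if cur = cap then some k
    else if 0 ≤ cur ∧ cur < (T.length : Int) then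
      pvWalk T cap f (PySem.List.pyGetD T cur 0) (k + 1)
    else none

def solution_alt (T : List Int) : List Int :=
  let n : Nat := T.length
  match (PySem.List.pyRange 0 (n : Int) 1).find? (fun i => PySem.List.pyGetD T i 0 == i) with
  | none => []   -- Python returns None here (not an int list); Pre_solution excludes these inputs
  | some cap =>
    (PySem.List.pyRange 0 (n : Int) 1).foldl
      (fun res i =>
        if i = cap then res
        else
          match pvWalk T cap n i 0 with
          | some d => PySem.List.pySetD res (d - 1) (PySem.List.pyGetD res (d - 1) 0 + 1)
          | none => res)
      (List.replicate (n - 1) (0 : Int))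

-- ===== PRECONDITION & SPEC =====
-- A returns None (not an int list) when T has no self-loop (no capital); exactly those inputs are excluded.
def Pre_solution (T : List Int) : Prop := ∃ i < T.length, T.getD i 0 = (i : Int)
instance (T : List Int) : Decidable (Pre_solution T) := by unfold Pre_solution; infer_instance

def pvWitness_solution : List Int := [0, 0, 1]

def Spec_solution (T : List Int) (out : List Int) : Prop := out = solution_alt T
instance (T : List Int) (out : List Int) : Decidable (Spec_solution T out) := by
  unfold Spec_solution; infer_instance

-- ===== CLAIM (what is proved, stated in full; the proofs are below) =====
def Claim_equal_solution : Prop := ∀ (T : List Int), Dom_solution T → Pre_solution T →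
  Spec_solution T (solution T)

-- ===== LEMMAS AND PROOFS =====

-- parent-pointer chain from j (total; only used under in-range hypotheses)
def chN (T : List Int) (j : Int) : Nat → Int
  | 0 => j
  | m + 1 => PySem.List.pyGetD T (chN T j m) 0

def InRg (T : List Int) (x : Int) : Prop := 0 ≤ x ∧ x < (T.length : Int)

-- j reaches the capital c for the first time after exactly e hops, staying in range
def ReachD (T : List Int) (c j : Int) (e : Nat) : Prop :=
  chN T j e = c ∧ ∀ m < e, chN T j m ≠ c ∧ InRg T (chN T j m)

-- the children of v in A's adjacency dict: indices i ≠ c with T[i] = v, in order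
def kidsOf (T : List Int) (c v : Int) : List Int :=
  ((PySem.List.enumerate T 0).filter (fun p => decide (¬(p.1 = c) ∧ p.2 = v))).map (fun p => p.1)

lemma chN_add (T : List Int) (j : Int) (a b : Nat) :
    chN T j (a + b) = chN T (chN T j a) b := by
  induction b with
  | zero => rfl
  | succ b ih => simpa [chN] using congrArg (fun x => PySem.List.pyGetD T x 0) ih

lemma chN_shift (T : List Int) (j : Int) (m : Nat) :
    chN T (PySem.List.pyGetD T j 0) m = chN T j (m + 1) := by
  have h := chN_add T j 1 m
  simpa [chN, Nat.add_comm] using h.symm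

lemma reach_unique (T : List Int) (c j : Int) (e e' : Nat)
    (h : ReachD T c j e) (h' : ReachD T c j e') : e = e' := by
  rcases Nat.lt_trichotomy e e' with h1 | h1 | h1
  · exact absurd h.1 (h'.2 e h1).1
  · exact h1
  · exact absurd h'.1 (h.2 e' h1).1

lemma reach_child (T : List Int) (c v i : Int) (d : Nat)
    (hiR : InRg T i) (hic : i ≠ c) (hT : PySem.List.pyGetD T i 0 = v)
    (hv : ReachD T c v d) : ReachD T c i (d + 1) := by
  constructor
  · have := chN_shift T i d
    rw [hT] at this
    rw [← this, hv.1]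
  · intro m hm
    match m with
    | 0 => exact ⟨hic, hiR⟩
    | Nat.succ m' =>
      have hs := chN_shift T i m'
      rw [hT] at hs
      rw [← hs]
      exact hv.2 m' (by omega)

lemma reach_lt (T : List Int) (c j : Int) (e : Nat) (hc : InRg T c)
    (h : ReachD T c j e) : e < T.length := by
  by_contra hn
  push Not at hn
  have hg : ∀ m : Nat, m ≤ e → (chN T j m).toNat < T.length := by
    intro m hm
    rcases Nat.lt_or_ge m e with hlt | hge
    · have := (h.2 m hlt).2; unfold InRg at this; omega
    · have hme : m = e := by omega
      simp only [hme, h.1]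
      unfold InRg at hc; omega
  have aux : ∀ m1 m2 : Nat, m1 < m2 → m2 ≤ e → chN T j m1 ≠ chN T j m2 := by
    intro m1 m2 h12 h2e hEq
    rcases Nat.lt_or_ge m2 e with hlt | hge
    · have hcyc : chN T j (m1 + (e - m2)) = c := by
        have h1 : chN T j e = chN T (chN T j m2) (e - m2) := by
          rw [← chN_add]; congr 1; omega
        have h2 : chN T j (m1 + (e - m2)) = chN T (chN T j m1) (e - m2) := chN_add T j m1 _
        rw [h2, hEq, ← h1, h.1]
      exact (h.2 (m1 + (e - m2)) (by omega)).1 hcyc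
    · have hm2e : m2 = e := by omega
      rw [hm2e, h.1] at hEq
      exact (h.2 m1 (by omega)).1 hEq
  let g : Fin (e + 1) → Fin T.length := fun m => ⟨(chN T j m.val).toNat, hg m.val (by omega)⟩
  have ginj : Function.Injective g := by
    rintro ⟨m1, h1⟩ ⟨m2, h2⟩ hEq
    simp only [g, Fin.mk.injEq] at hEq
    have hnn : ∀ m : Nat, m < e + 1 → 0 ≤ chN T j m := by
      intro m hm
      rcases Nat.lt_or_ge m e with hlt | hge
      · exact (h.2 m hlt).2.1
      · have : m = e := by omega
        rw [this, h.1]; exact hc.1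
    have hEq' : chN T j m1 = chN T j m2 := by
      have := hnn m1 h1; have := hnn m2 h2; omega
    rcases Nat.lt_trichotomy m1 m2 with hlt | heq | hgt
    · exact absurd hEq' (aux m1 m2 hlt (by omega))
    · exact Fin.ext heq
    · exact absurd hEq'.symm (aux m2 m1 hgt (by omega))
  have := Fintype.card_le_of_injective g ginj
  simp only [Fintype.card_fin] at this
  omega
lemma walk_some_of_reach (T : List Int) (c : Int) :
    ∀ (f : Nat) (j k : Int) (e : Nat), ReachD T c j e → e < f →
      pvWalk T c f j k = some (k + e) := by
  intro f
  induction f with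
  | zero => intro j k e _ he; omega
  | succ f ih =>
    intro j k e hre he
    match e with
    | 0 =>
      have hj : j = c := hre.1
      simp [pvWalk, hj]
    | Nat.succ e' =>
      have h0 := hre.2 0 (by omega)
      have hjc : j ≠ c := h0.1
      have hjR : InRg T j := h0.2
      have hre' : ReachD T c (PySem.List.pyGetD T j 0) e' := by
        constructor
        · rw [chN_shift]; exact hre.1
        · intro m hm; rw [chN_shift]; exact hre.2 (m + 1) (by omega)
      have := ih (PySem.List.pyGetD T j 0) (k + 1) e' hre' (by omega)
      unfold pvWalk
      rw [if_neg hjc, if_pos (show 0 ≤ j ∧ j < (T.length:Int) from hjR), this]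
      congr 1
      push_cast
      ring

lemma reach_of_walk_some (T : List Int) (c : Int) :
    ∀ (f : Nat) (j k r : Int), pvWalk T c f j k = some r →
      ∃ e : Nat, r = k + e ∧ ReachD T c j e := by
  intro f
  induction f with
  | zero => intro j k r h; simp [pvWalk] at h
  | succ f ih =>
    intro j k r h
    unfold pvWalk at h
    by_cases hjc : j = c
    · rw [if_pos hjc] at h
      refine ⟨0, by simpa using h.symm, hjc, by omega⟩
    · rw [if_neg hjc] at h
      by_cases hjR : 0 ≤ j ∧ j < (T.length:Int)
      · rw [if_pos hjR] at h
        obtain ⟨e, hr, hre⟩ := ih (PySem.List.pyGetD T j 0) (k + 1) r h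
        refine ⟨e + 1, by push_cast; omega, ?_, ?_⟩
        · rw [← chN_shift]; exact hre.1
        · intro m hm
          match m with
          | 0 => exact ⟨hjc, hjR⟩
          | Nat.succ m' => rw [← chN_shift]; exact hre.2 m' (by omega)
      · rw [if_neg hjR] at h; exact absurd h (by simp)

lemma walk_some_iff (T : List Int) (c j : Int) (r : Int) (hc : InRg T c) :
    pvWalk T c T.length j 0 = some r ↔ ∃ e : Nat, r = (e : Int) ∧ ReachD T c j e := by
  constructor
  · intro h
    obtain ⟨e, hr, hre⟩ := reach_of_walk_some T c _ j 0 r h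
    exact ⟨e, by omega, hre⟩
  · rintro ⟨e, hr, hre⟩
    have := walk_some_of_reach T c T.length j 0 e hre (reach_lt T c j e hc hre)
    rw [this]; congr 1; omega

lemma walk_none_iff (T : List Int) (c j : Int) (hc : InRg T c) :
    pvWalk T c T.length j 0 = none ↔ ∀ e, ¬ ReachD T c j e := by
  constructor
  · intro h e hre
    have := walk_some_of_reach T c T.length j 0 e hre (reach_lt T c j e hc hre)
    rw [h] at this; exact absurd this (by simp)
  · intro h
    cases hw : pvWalk T c T.length j 0 with
    | none => rfl
    | some r =>
      obtain ⟨e, _, hre⟩ := reach_of_walk_some T c _ j 0 r hw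
      exact absurd hre (h e)

lemma mem_kids_iff (T : List Int) (c v x : Int) :
    x ∈ kidsOf T c v ↔ InRg T x ∧ x ≠ c ∧ PySem.List.pyGetD T x 0 = v := by
  unfold kidsOf
  simp only [List.mem_map, List.mem_filter, PySem.List.mem_enumerate_iff]
  constructor
  · rintro ⟨p, ⟨⟨kk, hkk, rfl⟩, hdec⟩, rfl⟩
    simp only [decide_eq_true_eq, zero_add] at hdec ⊢
    refine ⟨⟨by omega, by exact_mod_cast hkk⟩, hdec.1, ?_⟩
    rw [PySem.List.pyGetD_natCast, List.getD_eq_getElem _ _ hkk]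
    exact hdec.2
  · rintro ⟨hxR, hxc, hxv⟩
    have hnn : 0 ≤ x := hxR.1
    have hlt : x.toNat < T.length := by
      have := hxR.2; omega
    have hx' : ((x.toNat : Nat) : Int) = x := Int.toNat_of_nonneg hnn
    refine ⟨(0 + (x.toNat : Int), T[x.toNat]'hlt), ⟨⟨x.toNat, hlt, rfl⟩, ?_⟩, ?_⟩
    · simp only [decide_eq_true_eq, zero_add, hx']
      refine ⟨hxc, ?_⟩
      rw [← hxv]
      exact (PySem.List.pyGetD_eq_getElem T (i := x) 0 hnn hxR.2).symm
    · simp only [zero_add, hx']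

lemma kids_nodup (T : List Int) (c v : Int) : (kidsOf T c v).Nodup := by
  unfold kidsOf
  have h1 := PySem.List.pairwise_lt_enumerate (xs := T) (s := 0)
  have h2 := h1.filter (fun p => decide (¬(p.1 = c) ∧ p.2 = v))
  have h3 := List.Pairwise.map (fun (p : Int × Int) => p.1)
    (fun a b hab => hab) h2
  exact List.Pairwise.imp (fun h => ne_of_lt h) h3
-- A's adjacency-dict build: getD and contains after the fold
lemma K_build (T : List Int) (c : Int) :
    ∀ (l : List (Int × Int)) (K0 : PySem.Dict Int (List Int)) (v : Int),
      ((l.foldl (fun K p => if p.1 = c then K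
          else if K.contains p.2 = false then K.insert p.2 [p.1]
          else K.modify p.2 [] (fun l => l ++ [p.1])) K0).getD v []
        = K0.getD v [] ++ (l.filter (fun p => decide (¬(p.1 = c) ∧ p.2 = v))).map (fun p => p.1))
      ∧ ((l.foldl (fun K p => if p.1 = c then K
          else if K.contains p.2 = false then K.insert p.2 [p.1]
          else K.modify p.2 [] (fun l => l ++ [p.1])) K0).contains v
        = (K0.contains v || l.any (fun p => !(p.1 == c) && (p.2 == v)))) := by
  intro l
  induction l with
  | nil => intro K0 v; simp
  | cons p l ih =>
    intro K0 v
    simp only [List.foldl_cons, List.filter_cons, List.any_cons]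
    by_cases hpc : p.1 = c
    · rw [if_pos hpc]
      have hfilt : (decide (¬(p.1 = c) ∧ p.2 = v)) = false := by simp [hpc]
      have hany : (!(p.1 == c) && (p.2 == v)) = false := by simp [hpc]
      simp only [hfilt, hany, Bool.false_eq_true, if_false, Bool.false_or]
      exact ih K0 v
    · simp only [if_neg hpc]
      by_cases hct : K0.contains p.2 = false
      · rw [if_pos hct]
        obtain ⟨ih1, ih2⟩ := ih (K0.insert p.2 [p.1]) v
        constructor
        · rw [ih1, PySem.Dict.getD_insert]
          by_cases hv : v = p.2
          · rw [if_pos hv]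
            rw [hv, PySem.Dict.getD_of_not_contains _ _ hct]
            have : (decide (¬(p.1 = c) ∧ p.2 = v)) = true := by
              simp [hpc, hv.symm]
            simp [this, hpc]
          · rw [if_neg hv]
            have : (decide (¬(p.1 = c) ∧ p.2 = v)) = false := by
              simp [hpc]; intro h; exact absurd h.symm hv
            simp [this, hpc, Ne.symm hv]
        · rw [ih2, PySem.Dict.contains_insert]
          by_cases hv : v = p.2
          · simp [hv, hpc, hct]
          · have h1 : (v == p.2) = false := by simpa using hv
            have h2 : (p.2 == v) = false := by simpa using fun h => hv h.symm
            simp [h1, h2, hpc]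
      · rw [if_neg hct]
        obtain ⟨ih1, ih2⟩ := ih (K0.modify p.2 [] (fun l => l ++ [p.1])) v
        constructor
        · rw [ih1, PySem.Dict.getD_modify]
          by_cases hv : v = p.2
          · rw [if_pos hv, hv]
            have : (decide (¬(p.1 = c) ∧ p.2 = v)) = true := by simp [hpc, hv.symm]
            simp [this, hpc]
          · rw [if_neg hv]
            have : (decide (¬(p.1 = c) ∧ p.2 = v)) = false := by
              simp [hpc]; intro h; exact absurd h.symm hv
            simp [this, hpc, Ne.symm hv]
        · rw [ih2, PySem.Dict.contains_modify]
          by_cases hv : v = p.2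
          · have : K0.contains p.2 = true := by
              cases h : K0.contains p.2
              · exact absurd h hct
              · rfl
            simp [hv, this]
          · have h1 : (v == p.2) = false := by simpa using hv
            have h2 : (p.2 == v) = false := by simpa using fun h => hv h.symm
            simp [h1, h2, hpc]
-- the clincher: what A's recursive trace writes into the routes array
lemma rtm_spec (T : List Int) (c : Int) (hc : InRg T c)
    (K : PySem.Dict Int (List Int))
    (hK : ∀ v, K.getD v [] = kidsOf T c v)
    (hKn : ∀ v, K.get? v = none → kidsOf T c v = []) :
    ∀ (fuel : Nat) (v : Int) (d : Nat) (R : List Int),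
      ReachD T c v d → T.length - d ≤ fuel → R.length = T.length →
      (pvRTM K fuel v R (d : Int)).length = T.length
      ∧ (∀ (j : Int) (e : Nat), ReachD T c j e → d < e → chN T j (e - d) = v →
           PySem.List.pyGetD (pvRTM K fuel v R (d:Int)) j 0 = (e : Int))
      ∧ (∀ j : Int, 0 ≤ j → (∀ e : Nat, ReachD T c j e → d < e → chN T j (e - d) ≠ v) →
           PySem.List.pyGetD (pvRTM K fuel v R (d:Int)) j 0 = PySem.List.pyGetD R j 0) := by
  intro fuel
  induction fuel with
  | zero =>
    intro v d R hv hfuel _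
    have := reach_lt T c v d hc hv
    omega
  | succ f ihf =>
    intro v d R hv hfuel hlen
    have hbranch : ∀ (j : Int) (e : Nat), ReachD T c j e → d < e → chN T j (e - d) = v →
        chN T j (e - d - 1) ∈ kidsOf T c v := by
      intro j e hre hlt hch
      rw [mem_kids_iff]
      have h1 := hre.2 (e - d - 1) (by omega)
      refine ⟨h1.2, h1.1, ?_⟩
      have h2 : (e - d - 1) + 1 = e - d := by omega
      have h3 : chN T j ((e - d - 1) + 1) = PySem.List.pyGetD T (chN T j (e - d - 1)) 0 := rfl
      rw [h2] at h3
      rw [← h3, hch]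
    cases hKv : K.get? v with
    | none =>
      have hkids : kidsOf T c v = [] := hKn v hKv
      have hred : pvRTM K (f+1) v R (d:Int) = R := by simp [pvRTM, hKv]
      rw [hred]
      refine ⟨hlen, ?_, fun j _ _ => rfl⟩
      intro j e hre hlt hch
      have hm := hbranch j e hre hlt hch
      rw [hkids] at hm
      exact absurd hm (List.not_mem_nil)
    | some L =>
      have hL : L = kidsOf T c v := by
        have h := hK v
        rw [PySem.Dict.getD_eq_get?_getD, hKv] at h
        simpa using h
      have hcast : (d:Int) + 1 = ((d+1 : Nat) : Int) := by push_cast; ring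
      have hred : pvRTM K (f+1) v R (d:Int) =
          L.foldl (fun r i => pvRTM K f i (PySem.List.pySetD r i ((d+1:Nat):Int)) ((d+1:Nat):Int)) R := by
        simp only [pvRTM, hKv, hcast]
      rw [hred]
      have hLnd : L.Nodup := hL ▸ kids_nodup T c v
      have hLmem : ∀ i ∈ L, i ∈ kidsOf T c v := fun i hi => hL ▸ hi
      suffices inner : ∀ (l : List Int), l.Nodup → (∀ i ∈ l, i ∈ kidsOf T c v) →
          ∀ R', R'.length = T.length →
          (l.foldl (fun r i => pvRTM K f i (PySem.List.pySetD r i ((d+1:Nat):Int)) ((d+1:Nat):Int)) R').length = T.length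
          ∧ (∀ (j : Int) (e : Nat), ReachD T c j e → d < e → chN T j (e - d) = v →
               chN T j (e - d - 1) ∈ l →
               PySem.List.pyGetD (l.foldl (fun r i => pvRTM K f i (PySem.List.pySetD r i ((d+1:Nat):Int)) ((d+1:Nat):Int)) R') j 0 = (e : Int))
          ∧ (∀ j : Int, 0 ≤ j →
               (∀ e : Nat, ReachD T c j e → d < e → chN T j (e - d) = v → chN T j (e - d - 1) ∈ l → False) →
               PySem.List.pyGetD (l.foldl (fun r i => pvRTM K f i (PySem.List.pySetD r i ((d+1:Nat):Int)) ((d+1:Nat):Int)) R') j 0 = PySem.List.pyGetD R' j 0) by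
        obtain ⟨i1, i2, i3⟩ := inner L hLnd hLmem R hlen
        refine ⟨i1, ?_, ?_⟩
        · intro j e hre hlt hch
          exact i2 j e hre hlt hch (hL ▸ hbranch j e hre hlt hch)
        · intro j hj hno
          exact i3 j hj (fun e hre hlt hch _ => hno e hre hlt hch)
      intro l
      induction l with
      | nil =>
        intro _ _ R' hlen'
        exact ⟨hlen', by simp, fun j _ _ => rfl⟩
      | cons i l ihl =>
        intro hnd hmem R' hlen'
        simp only [List.foldl_cons]
        have hik := hmem i List.mem_cons_self
        rw [mem_kids_iff] at hik
        obtain ⟨hiR, hic, hiT⟩ := hik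
        have hrei : ReachD T c i (d+1) := reach_child T c v i d hiR hic hiT hv
        obtain ⟨lenI, aI, bI⟩ := ihf i (d+1) (PySem.List.pySetD R' i ((d+1:Nat):Int)) hrei
          (by omega) (by simp [hlen'])
        obtain ⟨lenF, aF, bF⟩ := ihl (List.nodup_cons.mp hnd).2
          (fun x hx => hmem x (List.mem_cons_of_mem _ hx))
          (pvRTM K f i (PySem.List.pySetD R' i ((d+1:Nat):Int)) ((d+1:Nat):Int)) lenI
        have hine : i ∉ l := (List.nodup_cons.mp hnd).1
        have hinn : 0 ≤ i := hiR.1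
        have hitn : i.toNat < R'.length := by have := hiR.2; omega
        have hci : ((i.toNat : Nat) : Int) = i := Int.toNat_of_nonneg hinn
        refine ⟨lenF, ?_, ?_⟩
        · intro j e hre hlt hch hmem'
          rcases List.mem_cons.mp hmem' with hx | hx
          · -- the branch child of j is i itself
            have hjnn : 0 ≤ j := by
              have := (hre.2 0 (by omega)).2.1
              simpa [chN] using this
            have hnol : ∀ e', ReachD T c j e' → d < e' → chN T j (e' - d) = v →
                chN T j (e' - d - 1) ∈ l → False := by
              intro e' hre' _ _ hmem''
              have he' : e' = e := reach_unique T c j e' e hre' hre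
              subst he'
              rw [hx] at hmem''
              exact hine hmem''
            rw [bF j hjnn hnol]
            rcases Nat.lt_or_ge (d+1) e with hlt2 | hge
            · refine aI j e hre hlt2 ?_
              rw [show e - (d+1) = e - d - 1 by omega]
              exact hx
            · have he : e = d + 1 := by omega
              have hji : j = i := by
                have := hx
                rw [he] at this
                simpa [chN, show d + 1 - d - 1 = 0 by omega] using this
              have hbI : PySem.List.pyGetD (pvRTM K f i (PySem.List.pySetD R' i ((d+1:Nat):Int)) ((d+1:Nat):Int)) j 0
                  = PySem.List.pyGetD (PySem.List.pySetD R' i ((d+1:Nat):Int)) j 0 := by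
                refine bI j hjnn ?_
                intro e' hre' hlt' _
                have : e' = e := reach_unique T c j e' e hre' hre
                omega
              rw [hbI, hji, ← hci, PySem.List.pyGetD_pySetD_natCast _ _ _ _ _ hitn]
              simp [he]
          · exact aF j e hre hlt hch hx
        · intro j hjnn hno
          have hnol : ∀ e, ReachD T c j e → d < e → chN T j (e - d) = v →
              chN T j (e - d - 1) ∈ l → False :=
            fun e hre hlt hch hm => hno e hre hlt hch (List.mem_cons_of_mem _ hm)
          rw [bF j hjnn hnol]
          have hji : j ≠ i := by
            intro hji
            subst hji
            refine hno (d+1) hrei (by omega) ?_ ?_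
            · rw [show d + 1 - d = 1 by omega]
              show PySem.List.pyGetD T (chN T j 0) 0 = v
              simpa [chN] using hiT
            · rw [show d + 1 - d - 1 = 0 by omega]
              exact List.mem_cons_self
          have hbI : PySem.List.pyGetD (pvRTM K f i (PySem.List.pySetD R' i ((d+1:Nat):Int)) ((d+1:Nat):Int)) j 0
              = PySem.List.pyGetD (PySem.List.pySetD R' i ((d+1:Nat):Int)) j 0 := by
            refine bI j hjnn ?_
            intro e' hre' hlt' hch'
            refine hno e' hre' (by omega) ?_ ?_
            · rw [show e' - d = (e' - (d+1)) + 1 by omega]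
              show PySem.List.pyGetD T (chN T j (e' - (d+1))) 0 = v
              rw [hch']
              exact hiT
            · rw [show e' - d - 1 = e' - (d+1) by omega, hch']
              exact List.mem_cons_self
          rw [hbI]
          have hjc : ((j.toNat : Nat) : Int) = j := Int.toNat_of_nonneg hjnn
          rw [← hjc, ← hci, PySem.List.pyGetD_pySetD_natCast _ _ _ _ _ hitn]
          rw [if_neg (by omega)]
-- A's final counting pass
lemma hist_fold : ∀ (R D : List Int), (∀ x ∈ R, 0 ≤ x ∧ x < (D.length : Int)) →
    ((R.foldl (fun D i => PySem.List.pySetD D i (PySem.List.pyGetD D i 0 + 1)) D).length = D.length)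
    ∧ ∀ k : Nat, k < D.length →
        PySem.List.pyGetD (R.foldl (fun D i => PySem.List.pySetD D i (PySem.List.pyGetD D i 0 + 1)) D) (k:Int) 0
          = PySem.List.pyGetD D (k:Int) 0 + (R.count ((k:Int)) : Int) := by
  intro R
  induction R with
  | nil => intro D _; simp
  | cons x R ih =>
    intro D h
    have hx := h x List.mem_cons_self
    have hxn : 0 ≤ x := hx.1
    have hxt : x.toNat < D.length := by have := hx.2; omega
    have hcx : ((x.toNat : Nat) : Int) = x := Int.toNat_of_nonneg hxn
    have hlen' : (PySem.List.pySetD D x (PySem.List.pyGetD D x 0 + 1)).length = D.length := by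
      simp [PySem.List.length_pySetD]
    obtain ⟨ih1, ih2⟩ := ih (PySem.List.pySetD D x (PySem.List.pyGetD D x 0 + 1))
      (fun y hy => by rw [hlen']; exact h y (List.mem_cons_of_mem _ hy))
    simp only [List.foldl_cons]
    refine ⟨by rw [ih1, hlen'], ?_⟩
    intro k hk
    rw [ih2 k (by omega : k < (PySem.List.pySetD D x (PySem.List.pyGetD D x 0 + 1)).length)]
    have hset : ∀ w : Int, PySem.List.pyGetD (PySem.List.pySetD D x w) (k:Int) 0
        = if k = x.toNat then w else PySem.List.pyGetD D (k:Int) 0 := by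
      intro w
      conv_lhs => rw [← hcx]
      exact PySem.List.pyGetD_pySetD_natCast D x.toNat k w 0 hxt
    rw [hset _, List.count_cons]
    by_cases hkx : k = x.toNat
    · have hbt : (x == (k:Int)) = true := by subst hkx; simp [hcx]
      rw [if_pos hkx, hbt, if_pos rfl]
      have hxk : x = (k:Int) := by omega
      rw [hxk]
      push_cast
      omega
    · have hbf : (x == (k:Int)) = false := by
        simp only [beq_eq_false_iff_ne, ne_eq]
        omega
      rw [if_neg hkx, hbf, if_neg (by simp : ¬(false = true))]
      push_cast
      omega

-- B's counting loop
lemma bhist_fold (T : List Int) (c : Int) :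
    ∀ (l : List Int) (acc : List Int),
      (∀ i ∈ l, i ≠ c → ∀ r : Int, pvWalk T c T.length i 0 = some r → 1 ≤ r ∧ r - 1 < (acc.length : Int)) →
      ((l.foldl (fun res i =>
          if i = c then res
          else match pvWalk T c T.length i 0 with
            | some d => PySem.List.pySetD res (d - 1) (PySem.List.pyGetD res (d - 1) 0 + 1)
            | none => res) acc).length = acc.length)
      ∧ ∀ k : Nat, k < acc.length →
          PySem.List.pyGetD ((l.foldl (fun res i =>
            if i = c then res
            else match pvWalk T c T.length i 0 with
              | some d => PySem.List.pySetD res (d - 1) (PySem.List.pyGetD res (d - 1) 0 + 1)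
              | none => res) acc : List Int)) (k:Int) 0
          = PySem.List.pyGetD acc (k:Int) 0
            + ((l.countP (fun i => !(i == c) && (pvWalk T c T.length i 0 == some ((k:Int)+1)))) : Int) := by
  intro l
  induction l with
  | nil => intro acc _; simp
  | cons i l ih =>
    intro acc h
    simp only [List.foldl_cons, List.countP_cons]
    by_cases hic : i = c
    · rw [if_pos hic]
      obtain ⟨ih1, ih2⟩ := ih acc (fun x hx => h x (List.mem_cons_of_mem _ hx))
      refine ⟨ih1, ?_⟩
      intro k hk
      rw [ih2 k hk]
      simp [hic]
    · rw [if_neg hic]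
      cases hw : pvWalk T c T.length i 0 with
      | none =>
        obtain ⟨ih1, ih2⟩ := ih acc (fun x hx => h x (List.mem_cons_of_mem _ hx))
        refine ⟨ih1, ?_⟩
        intro k hk
        rw [ih2 k hk]
        simp [hw]
      | some r =>
        have hr := h i List.mem_cons_self hic r hw
        have hrn : 0 ≤ r - 1 := by omega
        have hrt : (r - 1).toNat < acc.length := by omega
        have hcr : (((r - 1).toNat : Nat) : Int) = r - 1 := Int.toNat_of_nonneg hrn
        have hlen' : (PySem.List.pySetD acc (r - 1) (PySem.List.pyGetD acc (r - 1) 0 + 1)).length = acc.length := by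
          simp [PySem.List.length_pySetD]
        obtain ⟨ih1, ih2⟩ := ih (PySem.List.pySetD acc (r - 1) (PySem.List.pyGetD acc (r - 1) 0 + 1))
          (fun x hx hxc r' hw' => by rw [hlen']; exact h x (List.mem_cons_of_mem _ hx) hxc r' hw')
        refine ⟨by rw [ih1, hlen'], ?_⟩
        intro k hk
        rw [ih2 k (by omega : k < (PySem.List.pySetD acc (r - 1) (PySem.List.pyGetD acc (r - 1) 0 + 1)).length)]
        have hset : ∀ w : Int, PySem.List.pyGetD (PySem.List.pySetD acc (r - 1) w) (k:Int) 0
            = if k = (r - 1).toNat then w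
              else PySem.List.pyGetD acc (k:Int) 0 := by
          intro w
          conv_lhs => rw [← hcr]
          exact PySem.List.pyGetD_pySetD_natCast acc (r - 1).toNat k w 0 hrt
        rw [hset _]
        by_cases hkr : k = (r - 1).toNat
        · have hreq : r = (k:Int) + 1 := by omega
          have hpred : (!(i == c) && ((some r : Option Int) == some ((k:Int)+1))) = true := by
            simp [hic, hreq]
          rw [if_pos hkr, hpred, if_pos rfl]
          have hr1 : r - 1 = (k:Int) := by omega
          rw [hr1]
          push_cast
          omega
        · have hrne : r ≠ (k:Int) + 1 := by omega
          have hpred : (!(i == c) && ((some r : Option Int) == some ((k:Int)+1))) = false := by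
            simp [hic, hrne]
          rw [if_neg hkr, hpred, if_neg (by simp : ¬(false = true))]
          push_cast
          omega

-- A's first-match capital scan is find?
lemma foldl_stay (P : Int → Prop) [DecidablePred P] :
    ∀ (l : List Int) (acc : Int), acc ≠ -1 →
      l.foldl (fun acc i => if acc = -1 ∧ P i then i else acc) acc = acc := by
  intro l
  induction l with
  | nil => intro acc _; rfl
  | cons i l ih =>
    intro acc hacc
    simp only [List.foldl_cons]
    rw [if_neg (by tauto)]
    exact ih acc hacc

lemma foldl_first (P : Int → Prop) [DecidablePred P] :
    ∀ (l : List Int), (∀ i ∈ l, i ≠ -1) →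
      l.foldl (fun acc i => if acc = -1 ∧ P i then i else acc) (-1)
        = ((l.find? (fun i => decide (P i))).getD (-1)) := by
  intro l
  induction l with
  | nil => intro _; rfl
  | cons i l ih =>
    intro h
    simp only [List.foldl_cons, List.find?_cons]
    by_cases hp : P i
    · rw [if_pos (⟨trivial, hp⟩ : True ∧ P i)]
      rw [foldl_stay P l i (h i List.mem_cons_self)]
      simp [hp]
    · rw [if_neg (by tauto)]
      rw [ih (fun x hx => h x (List.mem_cons_of_mem _ hx))]
      simp [hp]
lemma pyGetD_replicate_zero (n : Nat) (i : Int) :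
    PySem.List.pyGetD (List.replicate n (0:Int)) i 0 = 0 := by
  unfold PySem.List.pyGetD
  cases h : PySem.List.pyGet? (List.replicate n (0:Int)) i with
  | none => rfl
  | some x =>
    have := PySem.List.mem_of_pyGet?_eq_some _ h
    simp only [List.mem_replicate] at this
    simp [this.2]

theorem main_eq (T : List Int) (hpre : Pre_solution T) : solution T = solution_alt T := by
  -- the capital found by B's scan
  have hfind : ∃ c, (PySem.List.pyRange 0 (T.length:Int) 1).find?
      (fun i => PySem.List.pyGetD T i 0 == i) = some c := by
    obtain ⟨i, hi, hTi⟩ := hpre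
    cases h : (PySem.List.pyRange 0 (T.length:Int) 1).find? (fun i => PySem.List.pyGetD T i 0 == i) with
    | some c => exact ⟨c, rfl⟩
    | none =>
      exfalso
      have hmem : (i:Int) ∈ PySem.List.pyRange 0 (T.length:Int) 1 :=
        PySem.List.mem_pyRange_one.mpr ⟨by omega, by exact_mod_cast hi⟩
      have := List.find?_eq_none.mp h _ hmem
      apply this
      simp only [PySem.List.pyGetD_natCast, beq_iff_eq]
      exact hTi
  obtain ⟨c, hfind⟩ := hfind
  have hcc : PySem.List.pyGetD T c 0 = c := by simpa using List.find?_some hfind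
  have hcR : 0 ≤ c ∧ c < (T.length:Int) := by
    have := PySem.List.mem_pyRange_one.mp (List.mem_of_find?_eq_some hfind)
    exact ⟨this.1, this.2⟩
  have hcIn : InRg T c := hcR
  have hn1 : 1 ≤ T.length := by omega
  -- A's capital scan agrees
  have hne1 : ∀ i ∈ PySem.List.pyRange 0 (T.length:Int) 1, i ≠ (-1:Int) := by
    intro i hi
    have := (PySem.List.mem_pyRange_one.mp hi).1
    omega
  have hcapA : (PySem.List.pyRange 0 (T.length:Int) 1).foldl
      (fun acc i => if acc = -1 ∧ i = PySem.List.pyGetD T i 0 then i else acc) (-1) = c := by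
    rw [foldl_first (fun i => i = PySem.List.pyGetD T i 0) _ hne1]
    have hpq : (fun i => decide (i = PySem.List.pyGetD T i 0))
        = (fun i => PySem.List.pyGetD T i 0 == i) := by
      funext i
      rw [Bool.beq_eq_decide_eq]
      exact decide_eq_decide.mpr ⟨Eq.symm, Eq.symm⟩
    rw [hpq, hfind]
    rfl
  -- walk c = some 0
  have hwalkc : pvWalk T c T.length c 0 = some 0 := by
    obtain ⟨m, hm⟩ : ∃ m, T.length = m + 1 := ⟨T.length - 1, by omega⟩
    rw [hm]
    simp [pvWalk]
  -- A's adjacency dict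
  have hK : ∀ v, ((PySem.List.enumerate T 0).foldl
      (fun K p => if p.1 = c then K
        else if K.contains p.2 = false then K.insert p.2 [p.1]
        else K.modify p.2 [] (fun l => l ++ [p.1])) PySem.Dict.empty).getD v [] = kidsOf T c v := by
    intro v
    have h := (K_build T c (PySem.List.enumerate T 0) PySem.Dict.empty v).1
    rw [h]
    simp [kidsOf]
  have hKn : ∀ v, ((PySem.List.enumerate T 0).foldl
      (fun K p => if p.1 = c then K
        else if K.contains p.2 = false then K.insert p.2 [p.1]
        else K.modify p.2 [] (fun l => l ++ [p.1])) PySem.Dict.empty).get? v = none →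
      kidsOf T c v = [] := by
    intro v hv
    have hcont := (PySem.Dict.get?_eq_none_iff_contains _ v).mp hv
    have h2 := (K_build T c (PySem.List.enumerate T 0) PySem.Dict.empty v).2
    rw [hcont] at h2
    have hany : (PySem.List.enumerate T 0).any (fun p => !(p.1 == c) && (p.2 == v)) = false := by
      simpa using h2.symm
    unfold kidsOf
    have hf : (PySem.List.enumerate T 0).filter (fun p => decide (¬(p.1 = c) ∧ p.2 = v)) = [] := by
      rw [List.filter_eq_nil_iff]
      intro p hp
      have := List.any_eq_false.mp hany p hp
      simpa using this
    rw [hf]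
    rfl
  have hre0 : ReachD T c c 0 := ⟨rfl, fun m hm => absurd hm (Nat.not_lt_zero m)⟩
  have rtm := rtm_spec T c hcIn _ hK hKn (T.length + 1) c 0 (List.replicate T.length (0:Int))
    hre0 (by omega) (by simp)
  simp only [Nat.cast_zero] at rtm
  obtain ⟨Rlen, Ra, Rb⟩ := rtm
  -- the routes array holds each city's walk depth (0 when unreachable)
  have hR : ∀ j : Nat, j < T.length →
      PySem.List.pyGetD (pvRTM ((PySem.List.enumerate T 0).foldl
        (fun K p => if p.1 = c then K
          else if K.contains p.2 = false then K.insert p.2 [p.1]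
          else K.modify p.2 [] (fun l => l ++ [p.1])) PySem.Dict.empty)
        (T.length + 1) c (List.replicate T.length (0:Int)) 0) (j:Int) 0
      = ((pvWalk T c T.length (j:Int) 0).getD 0) := by
    intro j hj
    cases hw : pvWalk T c T.length (j:Int) 0 with
    | none =>
      have hno := (walk_none_iff T c (j:Int) hcIn).mp hw
      have hb := Rb (j:Int) (by positivity) (fun e hre _ _ => absurd hre (hno e))
      rw [hb]
      simp
    | some r =>
      obtain ⟨e, hr, hre⟩ := (walk_some_iff T c (j:Int) r hcIn).mp hw
      subst hr
      match e with
      | 0 =>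
        have hjc : (j:Int) = c := hre.1
        have hb := Rb (j:Int) (by positivity)
          (fun e' hre' hlt' _ => by
            have := reach_unique T c (j:Int) e' 0 hre' hre
            omega)
        rw [hb]
        simp
      | Nat.succ e' =>
        have ha := Ra (j:Int) (e' + 1) hre (by omega) (by rw [Nat.sub_zero]; exact hre.1)
        rw [ha]
        rfl
  set Rfin := pvRTM ((PySem.List.enumerate T 0).foldl
      (fun K p => if p.1 = c then K
        else if K.contains p.2 = false then K.insert p.2 [p.1]
        else K.modify p.2 [] (fun l => l ++ [p.1])) PySem.Dict.empty)
      (T.length + 1) c (List.replicate T.length (0:Int)) 0 with hRfin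
  -- every entry of the routes array is a valid histogram index
  have hRel : ∀ x ∈ Rfin, 0 ≤ x ∧ x < ((List.replicate T.length (0:Int)).length : Int) := by
    intro x hx
    simp only [List.length_replicate]
    obtain ⟨j, hj, hget⟩ := List.mem_iff_getElem.mp hx
    have hjT : j < T.length := by omega
    have hpg : PySem.List.pyGetD Rfin (j:Int) 0 = x := by
      rw [PySem.List.pyGetD_natCast, List.getD_eq_getElem _ _ hj, hget]
    rw [hR j hjT] at hpg
    cases hw : pvWalk T c T.length (j:Int) 0 with
    | none =>
      rw [hw] at hpg
      simp at hpg
      omega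
    | some r =>
      rw [hw] at hpg
      simp at hpg
      obtain ⟨e, hr, hre⟩ := (walk_some_iff T c (j:Int) r hcIn).mp hw
      have := reach_lt T c (j:Int) e hcIn hre
      omega
  obtain ⟨Dlen, Dk⟩ := hist_fold Rfin (List.replicate T.length (0:Int)) hRel
  -- B's tally loop
  have hcond : ∀ i ∈ PySem.List.pyRange 0 (T.length:Int) 1, i ≠ c →
      ∀ r : Int, pvWalk T c T.length i 0 = some r →
        1 ≤ r ∧ r - 1 < ((List.replicate (T.length - 1) (0:Int)).length : Int) := by
    intro i _ hic r hw
    simp only [List.length_replicate]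
    obtain ⟨e, hr, hre⟩ := (walk_some_iff T c i r hcIn).mp hw
    have helt := reach_lt T c i e hcIn hre
    have he0 : e ≠ 0 := by
      intro h0
      subst h0
      exact hic hre.1
    omega
  obtain ⟨Blen, Bk⟩ := bhist_fold T c (PySem.List.pyRange 0 (T.length:Int) 1)
    (List.replicate (T.length - 1) (0:Int)) hcond
  -- the count of cities at each positive depth agrees
  have hcount : ∀ k : Nat, Rfin.count ((k:Int)+1)
      = List.countP (fun i => !(i == c) && (pvWalk T c T.length i 0 == some ((k:Int)+1)))
          (PySem.List.pyRange 0 (T.length:Int) 1) := by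
    intro k
    have hmap : (PySem.List.pyRange 0 (T.length:Int) 1).map (fun j => PySem.List.pyGetD Rfin j 0) = Rfin := by
      have h := PySem.List.map_pyGetD_pyRange_zero' Rfin 0
      rw [Rlen] at h
      exact h
    conv_lhs => rw [List.count_eq_countP, ← hmap, List.countP_map]
    refine List.countP_congr ?_
    intro i hi
    have hiR := PySem.List.mem_pyRange_one.mp hi
    have hci : ((i.toNat : Nat) : Int) = i := Int.toNat_of_nonneg hiR.1
    have hitn : i.toNat < T.length := by omega
    have hpg : PySem.List.pyGetD Rfin i 0 = (pvWalk T c T.length i 0).getD 0 := by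
      conv_lhs => rw [← hci]
      rw [hR i.toNat hitn, hci]
    simp only [Function.comp_apply, hpg]
    cases hw : pvWalk T c T.length i 0 with
    | none =>
      simp only [Option.getD_none]
      constructor
      · intro h
        exfalso
        have : (0:Int) = (k:Int) + 1 := by simpa using h
        omega
      · intro h
        simp at h
    | some r =>
      simp only [Option.getD_some]
      by_cases hic : i = c
      · subst hic
        rw [hwalkc] at hw
        have hr0 : r = 0 := by simpa using hw.symm
        constructor
        · intro h
          exfalso
          have : r = (k:Int) + 1 := by simpa using h
          omega
        · intro h
          simp at h
      · have h1 : (!(i == c)) = true := by simp [hic]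
        simp [h1]
  -- unfold both ports and compare element-wise
  have hBdef : solution_alt T = (PySem.List.pyRange 0 (T.length:Int) 1).foldl
      (fun (res : List Int) (i : Int) => if i = c then res
        else match pvWalk T c T.length i 0 with
          | some d => PySem.List.pySetD res (d - 1) (PySem.List.pyGetD res (d - 1) 0 + 1)
          | none => res)
      (List.replicate (T.length - 1) (0:Int)) := by
    simp only [solution_alt, hfind]
  have hAdef : solution T = PySem.List.slice
      (Rfin.foldl (fun D i => PySem.List.pySetD D i (PySem.List.pyGetD D i 0 + 1))
        (List.replicate T.length (0:Int))) (some 1) none := by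
    simp only [solution]
    rw [hcapA, if_neg (by omega : ¬(c = -1)), hRfin]
  rw [hAdef, hBdef, PySem.List.slice_from_one]
  apply List.ext_getElem
  · rw [List.length_tail, Dlen, Blen]
    simp
  · intro k h1 h2
    have hk1 : k + 1 < T.length := by
      rw [List.length_tail, Dlen] at h1
      simp at h1
      omega
    have hk2 : k < T.length - 1 := by
      rw [Blen] at h2
      simpa using h2
    rw [List.getElem_tail, List.getElem_eq_getD (0:Int), List.getElem_eq_getD (0:Int)]
    have e1 : (Rfin.foldl (fun D i => PySem.List.pySetD D i (PySem.List.pyGetD D i 0 + 1))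
        (List.replicate T.length (0:Int))).getD (k+1) (0:Int)
        = PySem.List.pyGetD (Rfin.foldl (fun D i => PySem.List.pySetD D i (PySem.List.pyGetD D i 0 + 1))
            (List.replicate T.length (0:Int))) ((k+1 : Nat) : Int) 0 := by
      rw [PySem.List.pyGetD_natCast]
    have e2 : ((PySem.List.pyRange 0 (T.length:Int) 1).foldl
        (fun (res : List Int) (i : Int) => if i = c then res
          else match pvWalk T c T.length i 0 with
            | some d => PySem.List.pySetD res (d - 1) (PySem.List.pyGetD res (d - 1) 0 + 1)
            | none => res)
        (List.replicate (T.length - 1) (0:Int))).getD k (0:Int)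
        = PySem.List.pyGetD ((PySem.List.pyRange 0 (T.length:Int) 1).foldl
          (fun (res : List Int) (i : Int) => if i = c then res
            else match pvWalk T c T.length i 0 with
              | some d => PySem.List.pySetD res (d - 1) (PySem.List.pyGetD res (d - 1) 0 + 1)
              | none => res)
          (List.replicate (T.length - 1) (0:Int))) ((k : Nat) : Int) 0 := by
      rw [PySem.List.pyGetD_natCast]
    rw [e1, e2]
    rw [Dk (k+1) (by simpa using hk1), Bk k (by simpa using hk2)]
    have hc1 : ((k + 1 : Nat) : Int) = (k : Int) + 1 := by push_cast; ring
    rw [hc1, hcount k, pyGetD_replicate_zero, pyGetD_replicate_zero]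

-- ===== VERDICT (by name: the statement is the Claim_ definition above) =====
theorem solution_spec : Claim_equal_solution := by
  intro T _ hpre
  unfold Spec_solution
  exact main_eq T hpre
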